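-- pv_equiv track=rewrite | github.com/cschan279/canbus_comm | zhcx/nxr_app/utils/nxr_frame.py | ext_id
-- ===== SOURCE A (Python) =====
-- def assert_var(var, typ, len_limit):
--     wn = "Wrong type: {}/{}".format(str(type(var)), str(typ))
--     assert isinstance(var, typ), wn
--     wn = "Out of range: 0<{}<{}".format(var, 2**len_limit)
--     assert var >= 0 and var < 2**len_limit, wn
--     return
--
-- def ext_id(ptp=0x0, dst=0xff, src=0xf0, grp=0x0):
--     val_len = (1,8,8,3)
--     var = (ptp, dst, src, grp)
--     res = 0x060
--     for i in range(4):
--         assert_var(var[i], int, val_len[i])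
--         res = res << val_len[i]
--         res += var[i]
--     return res
-- ===== SOURCE B (Python) =====
-- def assert_var(var, typ, len_limit):
--     wn = "Wrong type: {}/{}".format(str(type(var)), str(typ))
--     assert isinstance(var, typ), wn
--     wn = "Out of range: 0<{}<{}".format(var, 2**len_limit)
--     assert var >= 0 and var < 2**len_limit, wn
--     return
--
-- def field_bits(v, w):
--     """MSB-first binary digits of v in exactly w bits, via repeated divmod."""
--     bits = []
--     for _ in range(w):
--         v, b = divmod(v, 2)
--         bits.append(b)
--     return bits[::-1]
--
-- def ext_id(ptp=0x0, dst=0xff, src=0xf0, grp=0x0):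
--     assert_var(ptp, int, 1)
--     assert_var(dst, int, 8)
--     assert_var(src, int, 8)
--     assert_var(grp, int, 3)
--     bits = (field_bits(0x060, 7) + field_bits(ptp, 1) + field_bits(dst, 8)
--             + field_bits(src, 8) + field_bits(grp, 3))
--     res = 0
--     for b in bits:
--         res = 2 * res + b
--     return res
-- ===== Notes on version B (the rewrite author's own statement) =====
-- stated objective: alternative
-- what changed: B builds the id as a concatenated list of binary digits (each field decomposed MSB-first by repeated divmod) and folds the digit list back into an integer, instead of A's shift-and-add accumulation over parallel (value, width) tuples.
import Mathlib
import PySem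

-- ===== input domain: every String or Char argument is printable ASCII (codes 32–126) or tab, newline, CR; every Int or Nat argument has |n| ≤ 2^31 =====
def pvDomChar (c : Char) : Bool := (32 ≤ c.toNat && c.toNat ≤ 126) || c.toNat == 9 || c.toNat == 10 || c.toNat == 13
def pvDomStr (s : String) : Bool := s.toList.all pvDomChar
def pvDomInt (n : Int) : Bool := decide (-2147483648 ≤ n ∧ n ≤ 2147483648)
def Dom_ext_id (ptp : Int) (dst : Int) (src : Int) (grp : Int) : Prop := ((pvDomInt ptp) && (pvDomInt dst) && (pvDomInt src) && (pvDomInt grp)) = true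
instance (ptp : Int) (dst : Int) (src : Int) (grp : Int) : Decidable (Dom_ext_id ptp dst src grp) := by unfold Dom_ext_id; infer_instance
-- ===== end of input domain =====

-- B assembles the id as a concatenated list of binary digits (divmod bit extraction, then one
-- fold over the digits) instead of A's shift-and-add accumulation over (value, width) pairs;
-- objective: alternative algorithm, same O(1) cost.

-- ===== PORT A =====
-- literal port of A: res = 0x060, then 4 loop iterations shifting by val_len[i] and adding var[i]
def ext_id (ptp : Int) (dst : Int) (src : Int) (grp : Int) : Int :=
  let val_len : List Nat := [1, 8, 8, 3]
  let var : List Int := [ptp, dst, src, grp]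
  (PySem.List.pyRange 0 4 1).foldl
    (fun res i =>
      (res <<< ((PySem.List.pyGet? val_len i).getD 0)) + (PySem.List.pyGet? var i).getD 0)
    0x060

-- ===== PORT B =====
-- port of Source B's field_bits: 'for _ in range(w): v, b = divmod(v, 2); bits.append(b)' as
-- structural recursion on the remaining iteration count over the same (v, bits) state
def fieldBitsLoop : Nat → Int → List Int → Int × List Int
  | 0, v, bits => (v, bits)
  | n + 1, v, bits => fieldBitsLoop n (PySem.Int.floordiv v 2) (bits ++ [PySem.Int.mod v 2])

-- 'return bits[::-1]'
def fieldBits (v : Int) (w : Nat) : List Int :=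
  (fieldBitsLoop w v []).2.reverse

def ext_id_alt (ptp : Int) (dst : Int) (src : Int) (grp : Int) : Int :=
  let bits := fieldBits 0x060 7 ++ fieldBits ptp 1 ++ fieldBits dst 8
              ++ fieldBits src 8 ++ fieldBits grp 3
  bits.foldl (fun res b => 2 * res + b) 0

-- ===== PRECONDITION & SPEC =====
-- Pre_ excludes exactly the inputs on which A's assert_var raises AssertionError (a field outside its bit range)
def Pre_ext_id (ptp : Int) (dst : Int) (src : Int) (grp : Int) : Prop :=
  0 ≤ ptp ∧ ptp < 2 ∧ 0 ≤ dst ∧ dst < 256 ∧ 0 ≤ src ∧ src < 256 ∧ 0 ≤ grp ∧ grp < 8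
instance (ptp : Int) (dst : Int) (src : Int) (grp : Int) : Decidable (Pre_ext_id ptp dst src grp) := by unfold Pre_ext_id; infer_instance
def pvWitness_ext_id : Int × Int × Int × Int := (1, 255, 240, 7)
def Spec_ext_id (ptp : Int) (dst : Int) (src : Int) (grp : Int) (out : Int) : Prop := out = ext_id_alt ptp dst src grp
instance (ptp : Int) (dst : Int) (src : Int) (grp : Int) (out : Int) : Decidable (Spec_ext_id ptp dst src grp out) := by unfold Spec_ext_id; infer_instance

-- ===== CLAIM (what is proved, stated in full; the proofs are below) =====
def Claim_equal_ext_id : Prop := ∀ (ptp : Int) (dst : Int) (src : Int) (grp : Int), Dom_ext_id ptp dst src grp → Pre_ext_id ptp dst src grp → Spec_ext_id ptp dst src grp (ext_id ptp dst src grp)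

-- ===== LEMMAS AND PROOFS =====

-- the bits accumulator only ever grows on the right
lemma fieldBitsLoop_acc (w : Nat) : ∀ (v : Int) (bits : List Int),
    (fieldBitsLoop w v bits).2 = bits ++ (fieldBitsLoop w v []).2 := by
  induction w with
  | zero => intro v bits; simp [fieldBitsLoop]
  | succ n ih =>
      intro v bits
      rw [fieldBitsLoop, fieldBitsLoop]
      simp only [List.nil_append]
      rw [ih, ih (PySem.Int.floordiv v 2) [PySem.Int.mod v 2]]
      simp

-- peel one divmod step off the bit list
lemma fieldBits_succ (v : Int) (w : Nat) :
    fieldBits v (w + 1) = fieldBits (PySem.Int.floordiv v 2) w ++ [PySem.Int.mod v 2] := by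
  unfold fieldBits
  rw [fieldBitsLoop, fieldBitsLoop_acc]
  simp

-- folding 2*res+b over the w-bit list of v reconstructs v (positionally, after any prefix a)
lemma foldl_fieldBits (w : Nat) : ∀ (a v : Int), 0 ≤ v → v < 2 ^ w →
    (fieldBits v w).foldl (fun res b => 2 * res + b) a = a * 2 ^ w + v := by
  induction w with
  | zero =>
      intro a v h0 h1
      have : v = 0 := by omega
      simp [this, fieldBits, fieldBitsLoop]
  | succ n ih =>
      intro a v h0 h1
      rw [fieldBits_succ, List.foldl_append]
      have hd : PySem.Int.floordiv v 2 = v / 2 := PySem.Int.floordiv_eq_ediv_of_pos (by omega)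
      have hm : PySem.Int.mod v 2 = v % 2 := PySem.Int.mod_eq_emod_of_pos (by omega)
      have hp : (2 : Int) ^ (n + 1) = 2 * 2 ^ n := by ring
      have hb : v / 2 < 2 ^ n := by omega
      rw [hd, hm, ih a (v / 2) (by omega) hb]
      simp only [List.foldl_cons, List.foldl_nil]
      rw [hp]; ring_nf; omega

-- ===== VERDICT (by name: the statement is the Claim_ definition above) =====
theorem ext_id_spec : Claim_equal_ext_id := by
  intro ptp dst src grp _ hpre
  obtain ⟨h1, h2, h3, h4, h5, h6, h7, h8⟩ := hpre
  unfold Spec_ext_id ext_id ext_id_alt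
  simp only [List.foldl_append]
  rw [foldl_fieldBits 7 0 0x060 (by norm_num) (by norm_num),
      foldl_fieldBits 1 _ ptp h1 (by exact_mod_cast h2),
      foldl_fieldBits 8 _ dst h3 (by exact_mod_cast h4),
      foldl_fieldBits 8 _ src h5 (by exact_mod_cast h6),
      foldl_fieldBits 3 _ grp h7 (by exact_mod_cast h8)]
  have hr : PySem.List.pyRange 0 4 1 = [0, 1, 2, 3] := by decide
  rw [hr]
  simp only [List.foldl_cons, List.foldl_nil]
  have h2' : Int.toNat 2 = 2 := by decide
  have h3' : Int.toNat 3 = 3 := by decide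
  norm_num [PySem.List.pyGet?, PySem.List.pyIdx?, Int.shiftLeft_eq, h2', h3']
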